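-- pv_equiv track=rewrite | github.com/Kapizza/options-pricing-library | src/rough.py | _split_batches
-- ===== SOURCE A (Python) =====
-- def _split_batches(n, batch_size):
--     n = int(n); batch_size = int(max(1, batch_size))
--     sizes = []
--     done = 0
--     while done < n:
--         take = min(batch_size, n - done)
--         sizes.append(take)
--         done += take
--     return sizes
-- ===== SOURCE B (Python) =====
-- def _split_batches(n, batch_size):
--     n = int(n); batch_size = int(max(1, batch_size))
--     q, r = divmod(max(0, n), batch_size)
--     return [batch_size] * q + ([r] if r else [])
-- ===== Notes on version B (the rewrite author's own statement) =====
-- stated objective: simpler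
-- what changed: Replaced the accumulating while-loop (running 'done' counter, append per batch) by a closed-form divmod: q full batches of batch_size plus one remainder batch if nonzero, clamping n to 0 to match the loop's empty result on non-positive n.
import Mathlib
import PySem

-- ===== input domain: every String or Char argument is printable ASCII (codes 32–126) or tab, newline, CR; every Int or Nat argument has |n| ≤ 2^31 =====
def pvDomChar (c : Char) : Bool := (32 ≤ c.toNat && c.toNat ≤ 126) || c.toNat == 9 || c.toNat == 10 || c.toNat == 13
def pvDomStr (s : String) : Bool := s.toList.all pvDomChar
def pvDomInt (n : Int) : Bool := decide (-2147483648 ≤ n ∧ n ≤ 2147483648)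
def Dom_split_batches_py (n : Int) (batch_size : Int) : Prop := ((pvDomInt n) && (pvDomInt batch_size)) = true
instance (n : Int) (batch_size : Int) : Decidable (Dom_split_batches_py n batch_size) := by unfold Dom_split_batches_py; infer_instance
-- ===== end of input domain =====

-- B replaces A's accumulating while-loop by a closed-form divmod construction (simpler, same exact values).


-- ===== PORT A =====
-- the while-loop: state is `done`; appends min(batch_size, n - done) each round
def splitBatchesLoop (n bs done : Int) (hbs : 1 ≤ bs) : List Int :=
  if _h : done < n then
    let take := min bs (n - done)
    take :: splitBatchesLoop n bs (done + take) hbs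
  else []
termination_by (n - done).toNat
decreasing_by
  omega

def split_batches_py (n : Int) (batch_size : Int) : List Int :=
  splitBatchesLoop n (max 1 batch_size) 0 (le_max_left 1 batch_size)

-- ===== PORT B =====
def split_batches_py_alt (n : Int) (batch_size : Int) : List Int :=
  let bs := max 1 batch_size
  let m := max 0 n
  let q := PySem.Int.floordiv m bs
  let r := PySem.Int.mod m bs
  List.replicate q.toNat bs ++ (if r = 0 then [] else [r])

-- ===== PRECONDITION & SPEC =====
def Spec_split_batches_py (n : Int) (batch_size : Int) (out : List Int) : Prop := out = split_batches_py_alt n batch_size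
instance (n : Int) (batch_size : Int) (out : List Int) : Decidable (Spec_split_batches_py n batch_size out) := by unfold Spec_split_batches_py; infer_instance

-- ===== CLAIM (what is proved, stated in full; the proofs are below) =====
def Claim_equal_split_batches_py : Prop := ∀ (n : Int) (batch_size : Int), Dom_split_batches_py n batch_size → Spec_split_batches_py n batch_size (split_batches_py n batch_size)

-- ===== LEMMAS AND PROOFS =====

-- closed form of the loop, in terms of the remaining amount rem = n - done
theorem splitBatchesLoop_closed (k : Nat) : ∀ (n bs done : Int) (hbs : 1 ≤ bs),
    (n - done).toNat ≤ k →
    splitBatchesLoop n bs done hbs =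
      List.replicate ((max 0 (n - done)) / bs).toNat bs ++
        (if (max 0 (n - done)) % bs = 0 then [] else [(max 0 (n - done)) % bs]) := by
  induction k with
  | zero =>
    intro n bs done hbs hk
    unfold splitBatchesLoop
    have hle : n - done ≤ 0 := by omega
    have hmax : max 0 (n - done) = 0 := by omega
    simp [hmax, show ¬ done < n by omega]
  | succ k ih =>
    intro n bs done hbs hk
    unfold splitBatchesLoop
    by_cases h : done < n
    · have hrem : 0 < n - done := by omega
      have hmax : max 0 (n - done) = n - done := by omega
      simp only [h, dif_pos]
      by_cases hbig : bs < n - done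
      · -- full batch: take = bs, recurse
        have htake : min bs (n - done) = bs := by omega
        rw [htake, ih n bs (done + bs) hbs (by omega)]
        have hmax' : max 0 (n - (done + bs)) = n - done - bs := by omega
        have hbsne : bs ≠ 0 := by omega
        have hdiv := Int.add_mul_ediv_right (n - done - bs) 1 hbsne
        rw [show n - done - bs + 1 * bs = n - done by ring] at hdiv
        have hmod : (n - done - bs) % bs = (n - done) % bs := by
          have := Int.sub_emod_right (n - done) bs
          omega
        have hq0 : 0 ≤ (n - done - bs) / bs := Int.ediv_nonneg (by omega) (by omega)
        rw [hmax, hmax', hmod, hdiv,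
          show ((n - done - bs) / bs + 1).toNat = ((n - done - bs) / bs).toNat + 1 by omega,
          List.replicate_succ]
        simp
      · -- last (possibly partial) batch: take = n - done, loop stops next round
        have htake : min bs (n - done) = n - done := by omega
        rw [htake]
        unfold splitBatchesLoop
        simp only [show ¬ done + (n - done) < n by omega, dif_neg, not_false_iff]
        rw [hmax]
        by_cases heq : n - done = bs
        · have hdiv : (n - done) / bs = 1 := by rw [heq]; exact Int.ediv_self (by omega)
          have hmod : (n - done) % bs = 0 := by rw [heq]; simp
          simp [hdiv, hmod]
          omega
        · have hlt : n - done < bs := by omega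
          have hdiv : (n - done) / bs = 0 := Int.ediv_eq_zero_of_lt (by omega) hlt
          have hmod : (n - done) % bs = n - done := Int.emod_eq_of_lt (by omega) hlt
          simp [hdiv, hmod, show ¬ (n - done) = 0 by omega]
    · have hmax : max 0 (n - done) = 0 := by omega
      simp [hmax, h]

theorem split_batches_py_spec : Claim_equal_split_batches_py := by
  intro n batch_size _
  unfold Spec_split_batches_py split_batches_py split_batches_py_alt
  have hbs : (1:Int) ≤ max 1 batch_size := le_max_left 1 batch_size
  rw [splitBatchesLoop_closed (n - 0).toNat n (max 1 batch_size) 0 hbs le_rfl]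
  have hb : (0:Int) < max 1 batch_size := by omega
  simp only [PySem.Int.floordiv_eq_ediv_of_pos hb, PySem.Int.mod_eq_emod_of_pos hb]
  norm_num
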